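-- pv_equiv track=rewrite | github.com/oguzcan-yavuz/soyagaci | lineage.py | refine_list
-- ===== SOURCE A (Python) =====
-- def refine_list(result):
--     refine_results, index = [], 0
--     while index < len(result):
--         if "https" in result[index]:
--             index += 15
--         else:
--             refine_results.append(result[index])
--             index += 1
--     return refine_results
-- ===== SOURCE B (Python) =====
-- def refine_list(result):
--     refine_results = []
--     rest = result
--     while True:
--         i = next((j for j, item in enumerate(rest) if "https" in item), None)
--         if i is None:
--             refine_results.extend(rest)
--             return refine_results
--         refine_results.extend(rest[:i])
--         rest = rest[i + 15:]
-- ===== Notes on version B (the rewrite author's own statement) =====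
-- stated objective: alternative
-- what changed: Replaced the element-by-element index-jumping while loop by a chunked search-and-slice scheme: repeatedly find the next 'https' match with a generator, copy the whole clean prefix at once with extend, and slice 15 elements past the match.
import Mathlib
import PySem

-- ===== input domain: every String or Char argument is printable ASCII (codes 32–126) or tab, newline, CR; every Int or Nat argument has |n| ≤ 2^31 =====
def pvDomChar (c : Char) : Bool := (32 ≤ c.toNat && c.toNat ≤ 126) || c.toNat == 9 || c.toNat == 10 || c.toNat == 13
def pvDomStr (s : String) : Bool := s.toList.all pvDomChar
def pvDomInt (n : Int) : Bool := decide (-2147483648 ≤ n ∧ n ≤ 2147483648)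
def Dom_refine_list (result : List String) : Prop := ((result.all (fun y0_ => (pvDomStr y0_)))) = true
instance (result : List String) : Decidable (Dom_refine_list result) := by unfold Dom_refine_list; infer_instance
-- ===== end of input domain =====

-- B replaces A's index-jumping per-element while loop by a chunked search-and-slice scheme
-- (find next 'https' match, copy the clean prefix wholesale, slice 15 past the match); alternative decomposition, same cost.

-- ===== PORT A =====
-- A's while loop: index jumps by 15 on a 'https' hit, else append and advance by 1.
def refine_list_loop (result : List String) (index : Nat) : List String :=
  if h : index < result.length then
    if PySem.Str.isIn "https" result[index] then
      refine_list_loop result (index + 15)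
    else
      result[index] :: refine_list_loop result (index + 1)
  else []
termination_by result.length - index

def refine_list (result : List String) : List String :=
  refine_list_loop result 0

-- ===== PORT B =====
-- termination fact the port's recursion cites: findIdx? hitting some i means the list is nonempty
theorem findIdx?_some_lt {p : String → Bool} {xs : List String} {i : Nat}
    (h : xs.findIdx? p = some i) : i < xs.length := by
  induction xs generalizing i with
  | nil => simp at h
  | cons x xs ih =>
    rw [List.findIdx?_cons] at h
    by_cases hx : p x
    · simp only [hx, if_true, Option.some.injEq] at h
      subst h; simp
    · simp only [hx, if_false, Bool.false_eq_true, Option.map_eq_some_iff] at h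
      obtain ⟨j, hj, rfl⟩ := h
      have := ih hj
      simp; omega

-- B's loop: find the next match; none ⇒ emit the rest; some i ⇒ emit the clean prefix, slice 15 past the match.
def refine_list_alt_go (rest : List String) : List String :=
  match h : rest.findIdx? (fun item => PySem.Str.isIn "https" item) with
  | none => rest
  | some i => rest.take i ++ refine_list_alt_go (rest.drop (i + 15))
termination_by rest.length
decreasing_by
  have := findIdx?_some_lt h
  simp [List.length_drop]; omega

def refine_list_alt (result : List String) : List String :=
  refine_list_alt_go result

-- ===== PRECONDITION & SPEC =====
def Spec_refine_list (result : List String) (out : List String) : Prop := out = refine_list_alt result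
instance (result : List String) (out : List String) : Decidable (Spec_refine_list result out) := by unfold Spec_refine_list; infer_instance

-- ===== CLAIM (what is proved, stated in full; the proofs are below) =====
def Claim_equal_refine_list : Prop := ∀ (result : List String), Dom_refine_list result → Spec_refine_list result (refine_list result)

-- ===== LEMMAS AND PROOFS =====

-- proof-side reformulation of A's loop as structural recursion with a pending skip count
def refine_list_go : List String → Nat → List String
  | [], _ => []
  | _ :: xs, (k + 1) => refine_list_go xs k
  | x :: xs, 0 =>
    if PySem.Str.isIn "https" x then refine_list_go xs 14
    else x :: refine_list_go xs 0

-- a pending countdown of k just drops the next k elements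
theorem refine_list_go_skip (xs : List String) (k : Nat) :
    refine_list_go xs k = refine_list_go (xs.drop k) 0 := by
  induction xs generalizing k with
  | nil => cases k <;> rfl
  | cons x xs ih =>
    cases k with
    | zero => rfl
    | succ k => simpa [refine_list_go] using ih k

-- A's loop from position `index` computes the skip-count loop on the suffix
theorem refine_list_loop_eq_aux (n : Nat) : ∀ (result : List String) (index : Nat),
    result.length - index ≤ n →
    refine_list_loop result index = refine_list_go (result.drop index) 0 := by
  induction n with
  | zero =>
    intro result index hn
    rw [refine_list_loop, dif_neg (by omega), List.drop_eq_nil_of_le (by omega)]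
    rfl
  | succ n ih =>
    intro result index hn
    rw [refine_list_loop]
    by_cases h : index < result.length
    · rw [dif_pos h, List.drop_eq_getElem_cons h]
      by_cases hin : PySem.Str.isIn "https" result[index]
      · have e : index + 1 + 14 = index + 15 := by omega
        have hr : refine_list_go (result[index] :: result.drop (index + 1)) 0
            = refine_list_go (result.drop (index + 15)) 0 := by
          rw [refine_list_go, if_pos hin, refine_list_go_skip, List.drop_drop, e]
        rw [if_pos hin, hr, ih result (index + 15) (by omega)]
      · rw [if_neg hin, ih result (index + 1) (by omega)]
        simp only [refine_list_go, hin, if_false, Bool.false_eq_true]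
    · rw [dif_neg h, List.drop_eq_nil_of_le (by omega)]
      rfl

theorem refine_list_loop_eq (result : List String) (index : Nat) :
    refine_list_loop result index = refine_list_go (result.drop index) 0 :=
  refine_list_loop_eq_aux (result.length - index) result index le_rfl

-- if no element matches, the skip-count loop returns the list unchanged
theorem refine_list_go_none (xs : List String)
    (h : xs.findIdx? (fun item => PySem.Str.isIn "https" item) = none) :
    refine_list_go xs 0 = xs := by
  induction xs with
  | nil => rfl
  | cons x xs ih =>
    rw [List.findIdx?_cons] at h
    by_cases hx : PySem.Str.isIn "https" x
    · simp only [hx, if_true] at h; exact absurd h (by simp)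
    · simp only [hx, if_false, Bool.false_eq_true, Option.map_eq_none_iff] at h
      rw [refine_list_go, if_neg hx, ih h]

-- if the first match is at i, the skip-count loop emits the prefix and continues 15 past it
theorem refine_list_go_some (xs : List String) (i : Nat)
    (h : xs.findIdx? (fun item => PySem.Str.isIn "https" item) = some i) :
    refine_list_go xs 0 = xs.take i ++ refine_list_go (xs.drop (i + 15)) 0 := by
  induction xs generalizing i with
  | nil => simp at h
  | cons x xs ih =>
    rw [List.findIdx?_cons] at h
    by_cases hx : PySem.Str.isIn "https" x
    · simp only [hx, if_true] at h
      obtain rfl : i = 0 := by simpa using h.symm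
      rw [refine_list_go, if_pos hx, refine_list_go_skip]
      simp
    · simp only [hx, if_false, Bool.false_eq_true, Option.map_eq_some_iff] at h
      obtain ⟨j, hj, rfl⟩ := h
      have hd : (x :: xs).drop (j + 1 + 15) = xs.drop (j + 15) := by
        rw [show j + 1 + 15 = (j + 15) + 1 from by omega, List.drop_succ_cons]
      rw [refine_list_go, if_neg hx, ih j hj, List.take_succ_cons, List.cons_append, hd]

-- the two loop shapes agree
theorem refine_list_go_eq_alt (n : Nat) : ∀ (xs : List String), xs.length ≤ n →
    refine_list_go xs 0 = refine_list_alt_go xs := by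
  induction n with
  | zero =>
    intro xs hn
    have : xs = [] := List.eq_nil_of_length_eq_zero (by omega)
    subst this
    rw [refine_list_alt_go]
    rfl
  | succ n ih =>
    intro xs hn
    rw [refine_list_alt_go]
    cases h : xs.findIdx? (fun item => PySem.Str.isIn "https" item) with
    | none => exact refine_list_go_none xs h
    | some i =>
      have hi := findIdx?_some_lt h
      rw [refine_list_go_some xs i h, ih (xs.drop (i + 15)) (by simp [List.length_drop]; omega)]

-- ===== VERDICT (by name: the statement is the Claim_ definition above) =====
theorem refine_list_spec : Claim_equal_refine_list := by
  intro result _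
  unfold Spec_refine_list refine_list refine_list_alt
  rw [refine_list_loop_eq result 0, List.drop_zero]
  exact refine_list_go_eq_alt result.length result le_rfl
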